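-- pv_equiv track=rewrite | github.com/kaisalb/SWU | karabastCSVprocessing_light.py | get_aspect_color
-- ===== SOURCE A (Python) =====
-- SW_COLORS = {
--     "Vigilance": "blue", "Command": "green", "Aggression": "red", "Cunning": "yellow",
--     "Heroism": "white", "Villainy": "black", "Neutral": "#808080", "Highlight": "#ff00ff",
--     "Background": "#1a1a1a", "Text": "#FFD700", "Grid": "#404040",
--     "WinRateHigh": "#90EE90", "WinRateLow": "#FFB6C1"
-- }
--
-- TEXT_ASPECT_COLORS = {
--     "Vigilance": "#4169E1", "Command": "#32CD32", "Aggression": "#FF4500", "Cunning": "#FFD700",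
--     "Heroism": "#FFFFFF", "Villainy": "#D3D3D3", "Neutral": "#A9A9A9"
-- }
--
-- def get_aspect_color(aspects, use_text_colors=False):
--     if not aspects or not isinstance(aspects, list):
--         return TEXT_ASPECT_COLORS["Neutral"] if use_text_colors else SW_COLORS["Neutral"]
--     priority = ["Vigilance", "Command", "Aggression", "Cunning"]
--     aspect_list = [str(a).strip().title() for a in aspects]
--     primaries = [a for a in priority if a in aspect_list]
--     alignments = [a for a in ["Heroism", "Villainy"] if a in aspect_list]
--     palette = TEXT_ASPECT_COLORS if use_text_colors else SW_COLORS
--     if primaries: return palette.get(primaries[0], palette["Neutral"])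
--     if alignments: return palette.get(alignments[0], palette["Neutral"])
--     return palette["Neutral"]
-- ===== SOURCE B (Python) =====
-- SW_COLORS = {
--     "Vigilance": "blue", "Command": "green", "Aggression": "red", "Cunning": "yellow",
--     "Heroism": "white", "Villainy": "black", "Neutral": "#808080", "Highlight": "#ff00ff",
--     "Background": "#1a1a1a", "Text": "#FFD700", "Grid": "#404040",
--     "WinRateHigh": "#90EE90", "WinRateLow": "#FFB6C1"
-- }
--
-- TEXT_ASPECT_COLORS = {
--     "Vigilance": "#4169E1", "Command": "#32CD32", "Aggression": "#FF4500", "Cunning": "#FFD700",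
--     "Heroism": "#FFFFFF", "Villainy": "#D3D3D3", "Neutral": "#A9A9A9"
-- }
--
-- _RANK = {"Vigilance": 0, "Command": 1, "Aggression": 2, "Cunning": 3,
--          "Heroism": 4, "Villainy": 5}
--
-- def get_aspect_color(aspects, use_text_colors=False):
--     if not aspects or not isinstance(aspects, list):
--         return TEXT_ASPECT_COLORS["Neutral"] if use_text_colors else SW_COLORS["Neutral"]
--     palette = TEXT_ASPECT_COLORS if use_text_colors else SW_COLORS
--     best_rank = None
--     best_aspect = None
--     for a in aspects:
--         name = str(a).strip().title()
--         r = _RANK.get(name)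
--         if r is not None and (best_rank is None or r < best_rank):
--             best_rank, best_aspect = r, name
--     if best_aspect is not None:
--         return palette[best_aspect]
--     return palette["Neutral"]
-- ===== Notes on version B (the rewrite author's own statement) =====
-- stated objective: alternative
-- what changed: Replaces the two membership-filtered priority-list comprehensions plus head indexing with a single rank table and one minimizing pass over the input list that keeps the lowest-ranked aspect seen.
import Mathlib
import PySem

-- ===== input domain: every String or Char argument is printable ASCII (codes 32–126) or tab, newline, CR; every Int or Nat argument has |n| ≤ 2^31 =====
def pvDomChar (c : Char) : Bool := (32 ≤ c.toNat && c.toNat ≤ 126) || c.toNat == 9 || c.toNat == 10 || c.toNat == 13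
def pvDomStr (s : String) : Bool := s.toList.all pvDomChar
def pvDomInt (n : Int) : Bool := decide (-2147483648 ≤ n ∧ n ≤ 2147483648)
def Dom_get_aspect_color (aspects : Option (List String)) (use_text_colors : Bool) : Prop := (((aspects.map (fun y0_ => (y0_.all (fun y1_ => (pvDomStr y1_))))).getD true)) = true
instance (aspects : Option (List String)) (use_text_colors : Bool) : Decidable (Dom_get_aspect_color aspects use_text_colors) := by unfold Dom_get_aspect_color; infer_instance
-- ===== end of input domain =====

-- B replaces A's two membership-filtered priority comprehensions by a rank table and one
-- minimizing pass over the input (objective: alternative decomposition, same cost class).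

-- shared module constants (both Pythons read the same module-level dicts)
def SW_COLORS : PySem.Dict String String := PySem.Dict.mk
  [("Vigilance", "blue"), ("Command", "green"), ("Aggression", "red"), ("Cunning", "yellow"),
   ("Heroism", "white"), ("Villainy", "black"), ("Neutral", "#808080"), ("Highlight", "#ff00ff"),
   ("Background", "#1a1a1a"), ("Text", "#FFD700"), ("Grid", "#404040"),
   ("WinRateHigh", "#90EE90"), ("WinRateLow", "#FFB6C1")]

def TEXT_ASPECT_COLORS : PySem.Dict String String := PySem.Dict.mk
  [("Vigilance", "#4169E1"), ("Command", "#32CD32"), ("Aggression", "#FF4500"),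
   ("Cunning", "#FFD700"), ("Heroism", "#FFFFFF"), ("Villainy", "#D3D3D3"), ("Neutral", "#A9A9A9")]

-- str.title() for the ASCII domain: uppercase a letter after a non-letter, lowercase after a letter
def pvTitleAux : Bool → List Char → List Char
  | _, [] => []
  | prev, c :: cs =>
    if PySem.Chars.isalpha c then
      (if prev then PySem.Chars.lowerChar c else PySem.Chars.upperChar c) :: pvTitleAux true cs
    else c :: pvTitleAux false cs

-- str(a).strip().title()
def pvNorm (a : String) : String := String.mk (pvTitleAux false (PySem.Str.strip a).toList)

-- ===== PORT A =====
def get_aspect_color (aspects : Option (List String)) (use_text_colors : Bool) : String :=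
  match aspects with
  | none => if use_text_colors then TEXT_ASPECT_COLORS.getD "Neutral" "" else SW_COLORS.getD "Neutral" ""
  | some l =>
    if l.isEmpty then
      (if use_text_colors then TEXT_ASPECT_COLORS.getD "Neutral" "" else SW_COLORS.getD "Neutral" "")
    else
      let priority : List String := ["Vigilance", "Command", "Aggression", "Cunning"]
      let aspect_list := l.map pvNorm
      let primaries := priority.filter (fun a => aspect_list.contains a)
      let alignments := (["Heroism", "Villainy"] : List String).filter (fun a => aspect_list.contains a)
      let palette := if use_text_colors then TEXT_ASPECT_COLORS else SW_COLORS
      match primaries with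
      | p :: _ => (palette.get? p).getD (palette.getD "Neutral" "")
      | [] =>
        match alignments with
        | a :: _ => (palette.get? a).getD (palette.getD "Neutral" "")
        | [] => palette.getD "Neutral" ""

-- ===== PORT B =====
def pvRANK : PySem.Dict String Int := PySem.Dict.mk
  [("Vigilance", 0), ("Command", 1), ("Aggression", 2), ("Cunning", 3), ("Heroism", 4), ("Villainy", 5)]

-- one loop iteration of Source B: keep the lowest-ranked aspect seen so far
def pvStep (best : Option (Int × String)) (a : String) : Option (Int × String) :=
  let name := pvNorm a
  match pvRANK.get? name with
  | none => best
  | some r =>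
    match best with
    | none => some (r, name)
    | some (b, _) => if r < b then some (r, name) else best

def get_aspect_color_alt (aspects : Option (List String)) (use_text_colors : Bool) : String :=
  match aspects with
  | none => if use_text_colors then TEXT_ASPECT_COLORS.getD "Neutral" "" else SW_COLORS.getD "Neutral" ""
  | some l =>
    if l.isEmpty then
      (if use_text_colors then TEXT_ASPECT_COLORS.getD "Neutral" "" else SW_COLORS.getD "Neutral" "")
    else
      let palette := if use_text_colors then TEXT_ASPECT_COLORS else SW_COLORS
      match l.foldl pvStep none with
      | some (_, name) => (palette.get? name).getD ""  -- palette[name]; name is always a palette key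
      | none => palette.getD "Neutral" ""

-- ===== PRECONDITION & SPEC =====
def Spec_get_aspect_color (aspects : Option (List String)) (use_text_colors : Bool) (out : String) : Prop := out = get_aspect_color_alt aspects use_text_colors
instance (aspects : Option (List String)) (use_text_colors : Bool) (out : String) : Decidable (Spec_get_aspect_color aspects use_text_colors out) := by unfold Spec_get_aspect_color; infer_instance

-- ===== CLAIM (what is proved, stated in full; the proofs are below) =====
def Claim_equal_get_aspect_color : Prop := ∀ (aspects : Option (List String)) (use_text_colors : Bool), Dom_get_aspect_color aspects use_text_colors → Spec_get_aspect_color aspects use_text_colors (get_aspect_color aspects use_text_colors)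

-- ===== LEMMAS AND PROOFS =====

-- the ranked key of rank r
def pvKeyOf (r : Int) : String :=
  if r = 0 then "Vigilance" else if r = 1 then "Command" else if r = 2 then "Aggression"
  else if r = 3 then "Cunning" else if r = 4 then "Heroism" else "Villainy"

-- the rank-minimizing fold on bare ranks
def pvG (b : Int) (a : String) : Int :=
  match pvRANK.get? (pvNorm a) with
  | some r => min b r
  | none => b

theorem pvRank_eval (a : String) : pvRANK.get? a =
    (if "Vigilance" = a then some 0 else if "Command" = a then some 1 else if "Aggression" = a then some 2
     else if "Cunning" = a then some 3 else if "Heroism" = a then some 4 else if "Villainy" = a then some 5 else none) := by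
  show (PySem.Dict.mk _).get? a = _
  simp only [PySem.Dict.get?_mk_cons, beq_iff_eq]
  rfl

theorem pvRank_spec (a : String) (r : Int) (h : pvRANK.get? a = some r) :
    0 ≤ r ∧ r < 6 ∧ a = pvKeyOf r ∧ pvRANK.get? (pvKeyOf r) = some r := by
  rw [pvRank_eval] at h
  split_ifs at h <;> cases h <;> subst_vars <;> exact ⟨by decide, by decide, by decide, by decide⟩

theorem pvL1 (ys : List String) : ∀ (b : Int), pvRANK.get? (pvKeyOf b) = some b →
    ys.foldl pvStep (some (b, pvKeyOf b)) =
      some (ys.foldl pvG b, pvKeyOf (ys.foldl pvG b)) ∧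
    pvRANK.get? (pvKeyOf (ys.foldl pvG b)) = some (ys.foldl pvG b) := by
  induction ys with
  | nil => intro b hb; exact ⟨rfl, hb⟩
  | cons a ys ih =>
    intro b hb
    cases h : pvRANK.get? (pvNorm a) with
    | none => simp only [List.foldl_cons, pvStep, pvG, h]; exact ih b hb
    | some r =>
      simp only [List.foldl_cons, pvStep, pvG, h]
      obtain ⟨-, -, hk, hkr⟩ := pvRank_spec _ _ h
      by_cases hlt : r < b
      · have hmin : min b r = r := by omega
        rw [hmin, hk, if_pos hlt]
        exact ih r hkr
      · have hmin : min b r = b := by omega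
        rw [hmin, if_neg hlt]
        exact ih b hb

theorem pvL0 (ys : List String) :
    (ys.foldl pvG 6 = 6 ∧ ys.foldl pvStep none = none) ∨
    (pvRANK.get? (pvKeyOf (ys.foldl pvG 6)) = some (ys.foldl pvG 6) ∧
      ys.foldl pvStep none = some (ys.foldl pvG 6, pvKeyOf (ys.foldl pvG 6))) := by
  induction ys with
  | nil => exact Or.inl ⟨rfl, rfl⟩
  | cons a ys ih =>
    cases h : pvRANK.get? (pvNorm a) with
    | none => simpa [List.foldl_cons, pvStep, pvG, h] using ih
    | some r =>
      obtain ⟨h0, h6, hk, hkr⟩ := pvRank_spec _ _ h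
      have hmin : min 6 r = r := by omega
      have h1 := pvL1 ys r hkr
      simp only [List.foldl_cons, pvStep, pvG, h]
      rw [hmin, hk]
      exact Or.inr ⟨h1.2, h1.1⟩

theorem pvG_le (ys : List String) : ∀ b : Int, ys.foldl pvG b ≤ b := by
  induction ys with
  | nil => intro b; exact le_refl b
  | cons a ys ih =>
    intro b
    cases h : pvRANK.get? (pvNorm a) with
    | none => simp only [List.foldl_cons, pvG, h]; exact ih b
    | some r => simp only [List.foldl_cons, pvG, h]; exact le_trans (ih _) (min_le_left _ _)

-- lower bound: the fold result is ≤ the rank of any ranked element of ys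
theorem pvM2 (ys : List String) : ∀ (b : Int) (k : String) (r : Int),
    k ∈ ys → pvRANK.get? (pvNorm k) = some r → ys.foldl pvG b ≤ r := by
  induction ys with
  | nil => intro _ _ _ h; exact absurd h (List.not_mem_nil)
  | cons a ys ih =>
    intro b k r hk hr
    rcases List.mem_cons.1 hk with rfl | hmem
    · simp only [List.foldl_cons, pvG, hr]
      exact le_trans (pvG_le ys _) (min_le_right _ _)
    · cases hr' : pvRANK.get? (pvNorm a) with
      | none => simp only [List.foldl_cons, pvG, hr']; exact ih _ k r hmem hr
      | some r' => simp only [List.foldl_cons, pvG, hr']; exact ih _ k r hmem hr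

-- achieved: the fold result is b or the rank of some element
theorem pvM1 (ys : List String) : ∀ b : Int,
    ys.foldl pvG b = b ∨ ∃ k ∈ ys, pvRANK.get? (pvNorm k) = some (ys.foldl pvG b) := by
  induction ys with
  | nil => intro b; exact Or.inl rfl
  | cons a ys ih =>
    intro b
    cases h : pvRANK.get? (pvNorm a) with
    | none =>
      simp only [List.foldl_cons, pvG, h]
      rcases ih b with h' | ⟨k, hk, hr⟩
      · exact Or.inl h'
      · exact Or.inr ⟨k, List.mem_cons_of_mem _ hk, hr⟩
    | some r =>
      simp only [List.foldl_cons, pvG, h]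
      rcases ih (min b r) with h' | ⟨k, hk, hr⟩
      · rcases min_choice b r with hm | hm
        · exact Or.inl (by rw [h', hm])
        · exact Or.inr ⟨a, List.mem_cons_self, by rw [h, h', hm]⟩
      · exact Or.inr ⟨k, List.mem_cons_of_mem _ hk, hr⟩

-- a ranked key with rank strictly above the fold result is not among the normalized aspects
theorem pvNotMem (l : List String) (key : String) (i : Int)
    (hkey : pvRANK.get? key = some i) (hlt : i < l.foldl pvG 6) :
    ∀ k ∈ l, pvNorm k ≠ key := by
  intro k hk hnk
  have := pvM2 l 6 k i hk (by rw [hnk]; exact hkey)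
  omega

-- the fold winner's key is among the normalized aspects
theorem pvMemWinner (l : List String) (hlt : l.foldl pvG 6 < 6) :
    ∃ k ∈ l, pvNorm k = pvKeyOf (l.foldl pvG 6) := by
  rcases pvM1 l 6 with h | ⟨k, hk, hr⟩
  · omega
  · obtain ⟨-, -, hkeq, -⟩ := pvRank_spec _ _ hr
    exact ⟨k, hk, hkeq⟩

-- ===== VERDICT (by name: the statement is the Claim_ definition above) =====
theorem get_aspect_color_spec : Claim_equal_get_aspect_color := by
  intro aspects u _
  unfold Spec_get_aspect_color get_aspect_color get_aspect_color_alt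
  cases aspects with
  | none => rfl
  | some l =>
    by_cases hl : l.isEmpty
    · simp [hl]
    · simp only [hl]
      rcases pvL0 l with ⟨hm, hfold⟩ | ⟨hval, hfold⟩
      · -- no ranked aspect: every ranked key is absent, both return Neutral
        rw [hfold]
        have habs : ∀ key i, pvRANK.get? key = some i → ∀ k ∈ l, pvNorm k ≠ key := by
          intro key i hkey
          obtain ⟨-, h6, -, -⟩ := pvRank_spec _ _ hkey
          exact pvNotMem l key i hkey (by omega)
        have b0 : (l.map pvNorm).contains "Vigilance" = false := by simpa using habs "Vigilance" 0 (by decide)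
        have b1 : (l.map pvNorm).contains "Command" = false := by simpa using habs "Command" 1 (by decide)
        have b2 : (l.map pvNorm).contains "Aggression" = false := by simpa using habs "Aggression" 2 (by decide)
        have b3 : (l.map pvNorm).contains "Cunning" = false := by simpa using habs "Cunning" 3 (by decide)
        have b4 : (l.map pvNorm).contains "Heroism" = false := by simpa using habs "Heroism" 4 (by decide)
        have b5 : (l.map pvNorm).contains "Villainy" = false := by simpa using habs "Villainy" 5 (by decide)
        simp only [List.filter, b0, b1, b2, b3, b4, b5]
      · -- a ranked aspect wins: the fold's minimum is the first ranked key present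
        obtain ⟨hge, hlt6, -, -⟩ := pvRank_spec _ _ hval
        have hwin := pvMemWinner l (by omega)
        have hm6 : l.foldl pvG 6 = 0 ∨ l.foldl pvG 6 = 1 ∨ l.foldl pvG 6 = 2 ∨
            l.foldl pvG 6 = 3 ∨ l.foldl pvG 6 = 4 ∨ l.foldl pvG 6 = 5 := by omega
        rcases hm6 with h | h | h | h | h | h
        · -- winner rank 0: Vigilance
          have cw : (l.map pvNorm).contains "Vigilance" = true := by
            rw [h] at hwin
            norm_num [pvKeyOf] at hwin
            simpa using hwin
          rw [h] at hfold
          norm_num [pvKeyOf] at hfold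
          rw [hfold]
          simp only [List.filter, cw]
          cases u <;> rfl
        · -- winner rank 1: Command
          have c0 : (l.map pvNorm).contains "Vigilance" = false := by
            simpa using pvNotMem l "Vigilance" 0 (by decide) (by omega)
          have cw : (l.map pvNorm).contains "Command" = true := by
            rw [h] at hwin
            norm_num [pvKeyOf] at hwin
            simpa using hwin
          rw [h] at hfold
          norm_num [pvKeyOf] at hfold
          rw [hfold]
          simp only [List.filter, c0, cw]
          cases u <;> rfl
        · -- winner rank 2: Aggression
          have c0 : (l.map pvNorm).contains "Vigilance" = false := by
            simpa using pvNotMem l "Vigilance" 0 (by decide) (by omega)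
          have c1 : (l.map pvNorm).contains "Command" = false := by
            simpa using pvNotMem l "Command" 1 (by decide) (by omega)
          have cw : (l.map pvNorm).contains "Aggression" = true := by
            rw [h] at hwin
            norm_num [pvKeyOf] at hwin
            simpa using hwin
          rw [h] at hfold
          norm_num [pvKeyOf] at hfold
          rw [hfold]
          simp only [List.filter, c0, c1, cw]
          cases u <;> rfl
        · -- winner rank 3: Cunning
          have c0 : (l.map pvNorm).contains "Vigilance" = false := by
            simpa using pvNotMem l "Vigilance" 0 (by decide) (by omega)
          have c1 : (l.map pvNorm).contains "Command" = false := by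
            simpa using pvNotMem l "Command" 1 (by decide) (by omega)
          have c2 : (l.map pvNorm).contains "Aggression" = false := by
            simpa using pvNotMem l "Aggression" 2 (by decide) (by omega)
          have cw : (l.map pvNorm).contains "Cunning" = true := by
            rw [h] at hwin
            norm_num [pvKeyOf] at hwin
            simpa using hwin
          rw [h] at hfold
          norm_num [pvKeyOf] at hfold
          rw [hfold]
          simp only [List.filter, c0, c1, c2, cw]
          cases u <;> rfl
        · -- winner rank 4: Heroism
          have c0 : (l.map pvNorm).contains "Vigilance" = false := by
            simpa using pvNotMem l "Vigilance" 0 (by decide) (by omega)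
          have c1 : (l.map pvNorm).contains "Command" = false := by
            simpa using pvNotMem l "Command" 1 (by decide) (by omega)
          have c2 : (l.map pvNorm).contains "Aggression" = false := by
            simpa using pvNotMem l "Aggression" 2 (by decide) (by omega)
          have c3 : (l.map pvNorm).contains "Cunning" = false := by
            simpa using pvNotMem l "Cunning" 3 (by decide) (by omega)
          have cw : (l.map pvNorm).contains "Heroism" = true := by
            rw [h] at hwin
            norm_num [pvKeyOf] at hwin
            simpa using hwin
          rw [h] at hfold
          norm_num [pvKeyOf] at hfold
          rw [hfold]
          simp only [List.filter, c0, c1, c2, c3, cw]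
          cases u <;> rfl
        · -- winner rank 5: Villainy
          have c0 : (l.map pvNorm).contains "Vigilance" = false := by
            simpa using pvNotMem l "Vigilance" 0 (by decide) (by omega)
          have c1 : (l.map pvNorm).contains "Command" = false := by
            simpa using pvNotMem l "Command" 1 (by decide) (by omega)
          have c2 : (l.map pvNorm).contains "Aggression" = false := by
            simpa using pvNotMem l "Aggression" 2 (by decide) (by omega)
          have c3 : (l.map pvNorm).contains "Cunning" = false := by
            simpa using pvNotMem l "Cunning" 3 (by decide) (by omega)
          have c4 : (l.map pvNorm).contains "Heroism" = false := by
            simpa using pvNotMem l "Heroism" 4 (by decide) (by omega)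
          have cw : (l.map pvNorm).contains "Villainy" = true := by
            rw [h] at hwin
            norm_num [pvKeyOf] at hwin
            simpa using hwin
          rw [h] at hfold
          norm_num [pvKeyOf] at hfold
          rw [hfold]
          simp only [List.filter, c0, c1, c2, c3, c4, cw]
          cases u <;> rfl
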